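-- pv_equiv track=rewrite | github.com/VikingInOrbit/YuMi-Lab | pdf_to_md.py | inject_option_images
-- ===== SOURCE A (Python) =====
-- def inject_option_images(page_text: str, option_image_links: list[str], option_ocr_texts: list[str]) -> str:
--     if len(option_image_links) < 4 or len(option_ocr_texts) < 4:
--         return page_text
--
--     lines = page_text.split("\n")
--     option_targets = ["- (a)", "- (b)", "- (c)", "- (d)"]
--     target_index = 0
--     output: list[str] = []
--
--     for line in lines:
--         output.append(line)
--         if target_index < 4 and line.strip() == option_targets[target_index]:
--             output.append(option_image_links[target_index])
--             ocr_text = option_ocr_texts[target_index].strip()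
--             if ocr_text:
--                 output.append("OCR:")
--                 output.append("> " + "\n> ".join(ocr_text.splitlines()))
--             target_index += 1
--
--     return "\n".join(output)
-- ===== SOURCE B (Python) =====
-- def inject_option_images(page_text: str, option_image_links: list[str], option_ocr_texts: list[str]) -> str:
--     if len(option_image_links) < 4 or len(option_ocr_texts) < 4:
--         return page_text
--
--     lines = page_text.split("\n")
--
--     # Pass 1: locate the insertion points, matching the four labels strictly in order.
--     points: list[tuple[int, int]] = []
--     pos = 0
--     for k, lab in enumerate(["- (a)", "- (b)", "- (c)", "- (d)"]):
--         while pos < len(lines) and lines[pos].strip() != lab: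
--             pos += 1
--         if pos == len(lines):
--             break
--         points.append((pos, k))
--         pos += 1
--
--     # Pass 2: rebuild, appending option k's block right after line points[k].
--     pieces: list[str] = []
--     pts = points[::-1]  # stack: smallest line index on top
--     for i, line in enumerate(lines):
--         pieces.append(line)
--         if pts and pts[-1][0] == i:
--             k = pts.pop()[1]
--             pieces.append(option_image_links[k])
--             ocr = option_ocr_texts[k].strip()
--             if ocr:
--                 pieces.append("OCR:")
--                 pieces.append("> " + "\n> ".join(ocr.splitlines()))
--     return "\n".join(pieces)
-- ===== Notes on version B (the rewrite author's own statement) =====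
-- stated objective: alternative
-- what changed: A interleaves matching and output in one stateful loop with a running target_index; B first pre-scans the lines to record the four insertion points (line index, option index) in strict label order, then rebuilds the output in a second pass that merges the recorded points back in by line index.
import Mathlib
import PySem

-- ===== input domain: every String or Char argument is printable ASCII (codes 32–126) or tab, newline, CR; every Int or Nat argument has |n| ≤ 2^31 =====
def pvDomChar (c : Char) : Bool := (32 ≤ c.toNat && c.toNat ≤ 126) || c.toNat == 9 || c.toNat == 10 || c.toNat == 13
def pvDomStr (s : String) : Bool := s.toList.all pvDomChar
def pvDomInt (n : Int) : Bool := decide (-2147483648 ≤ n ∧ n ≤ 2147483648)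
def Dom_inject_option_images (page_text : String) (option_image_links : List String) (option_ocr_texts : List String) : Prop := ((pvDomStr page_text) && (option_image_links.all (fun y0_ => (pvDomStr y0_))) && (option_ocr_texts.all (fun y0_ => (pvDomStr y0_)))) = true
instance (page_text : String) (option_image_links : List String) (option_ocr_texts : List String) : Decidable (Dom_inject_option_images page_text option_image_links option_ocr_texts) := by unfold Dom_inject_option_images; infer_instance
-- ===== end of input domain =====

-- B replaces A's single stateful loop (running target_index) by a pre-scan that records the
-- four insertion points in order, then a second pass that merges them back in by line index
-- (objective: alternative decomposition, same cost).

-- ===== PORT A =====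
def pvTargets : List String := ["- (a)", "- (b)", "- (c)", "- (d)"]

-- the 'for line in lines' loop; list indexing via pyGet? with getD "" (the ti < 4 guard and
-- the length ≥ 4 guard keep every index in range, so the default is never taken)
def pvALoop (links ocrs : List String) : List String → Nat → List String → List String
  | [], _, output => output
  | line :: rest, ti, output =>
    let output := output ++ [line]
    if ti < 4 ∧ PySem.Str.strip line = (PySem.List.pyGet? pvTargets ((ti : Int))).getD "" then
      let output := output ++ [(PySem.List.pyGet? links ((ti : Int))).getD ""]
      let ocr := PySem.Str.strip ((PySem.List.pyGet? ocrs ((ti : Int))).getD "")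
      let output := if ocr = "" then output
        else output ++ ["OCR:", "> " ++ PySem.Str.join "\n> " (PySem.Str.splitlines ocr)]
      pvALoop links ocrs rest (ti + 1) output
    else pvALoop links ocrs rest ti output

def inject_option_images (page_text : String) (option_image_links : List String) (option_ocr_texts : List String) : String :=
  if option_image_links.length < 4 ∨ option_ocr_texts.length < 4 then page_text
  else PySem.Str.join "\n" (pvALoop option_image_links option_ocr_texts ((PySem.Str.split? page_text "\n").getD []) 0 [])

-- ===== PORT B =====
def pvLabelsB : List String := ["- (a)", "- (b)", "- (c)", "- (d)"]

-- pass 1: 'for k, lab in enumerate(labels): while pos < len(lines) and ...' — the nested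
-- loops advance pos through the lines exactly once, written as one joint recursion
def pvScan : List String → Int → List (Int × String) → List (Int × Int)
  | _, _, [] => []
  | [], _, _ :: _ => []
  | line :: rest, idx, (k, lab) :: labs =>
    if PySem.Str.strip line = lab then (idx, k) :: pvScan rest (idx + 1) labs
    else pvScan rest (idx + 1) ((k, lab) :: labs)

def pvBlock (links ocrs : List String) (k : Int) : List String :=
  let ocr := PySem.Str.strip ((PySem.List.pyGet? ocrs k).getD "")
  (PySem.List.pyGet? links k).getD "" ::
    (if ocr = "" then []
     else ["OCR:", "> " ++ PySem.Str.join "\n> " (PySem.Str.splitlines ocr)])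

-- pass 2: 'for i, line in enumerate(lines)', consuming the points stack front-to-back
def pvRebuild (links ocrs : List String) : List (Int × String) → List (Int × Int) → List String
  | [], _ => []
  | (_, line) :: rest, [] => line :: pvRebuild links ocrs rest []
  | (i, line) :: rest, (j, k) :: pts =>
    if j = i then line :: (pvBlock links ocrs k ++ pvRebuild links ocrs rest pts)
    else line :: pvRebuild links ocrs rest ((j, k) :: pts)

def inject_option_images_alt (page_text : String) (option_image_links : List String) (option_ocr_texts : List String) : String :=
  if option_image_links.length < 4 ∨ option_ocr_texts.length < 4 then page_text
  else
    let lines := (PySem.Str.split? page_text "\n").getD []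
    PySem.Str.join "\n"
      (pvRebuild option_image_links option_ocr_texts
        (PySem.List.enumerate lines 0)
        (pvScan lines 0 (PySem.List.enumerate pvLabelsB 0)))

-- ===== PRECONDITION & SPEC =====
def Spec_inject_option_images (page_text : String) (option_image_links : List String) (option_ocr_texts : List String) (out : String) : Prop := out = inject_option_images_alt page_text option_image_links option_ocr_texts
instance (page_text : String) (option_image_links : List String) (option_ocr_texts : List String) (out : String) : Decidable (Spec_inject_option_images page_text option_image_links option_ocr_texts out) := by unfold Spec_inject_option_images; infer_instance

-- ===== CLAIM (what is proved, stated in full; the proofs are below) =====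
def Claim_equal_inject_option_images : Prop := ∀ (page_text : String) (option_image_links : List String) (option_ocr_texts : List String), Dom_inject_option_images page_text option_image_links option_ocr_texts → Spec_inject_option_images page_text option_image_links option_ocr_texts (inject_option_images page_text option_image_links option_ocr_texts)

-- ===== LEMMAS AND PROOFS =====

-- A's loop only appends to its accumulator
theorem pvALoop_append (links ocrs : List String) :
    ∀ (lines : List String) (ti : Nat) (acc : List String),
      pvALoop links ocrs lines ti acc = acc ++ pvALoop links ocrs lines ti [] := by
  intro lines
  induction lines with
  | nil => intro ti acc; simp [pvALoop]
  | cons line rest ih =>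
    intro ti acc
    simp only [pvALoop]
    split_ifs with h1 h2 <;>
      · rw [ih]
        conv_rhs => rw [ih]
        simp

-- every index recorded by the pre-scan is ≥ the scan's starting position
theorem pvScan_lb :
    ∀ (lines : List String) (idx : Int) (labs : List (Int × String))
      (p : Int × Int), p ∈ pvScan lines idx labs → idx ≤ p.1 := by
  intro lines
  induction lines with
  | nil => intro idx labs p hp; cases labs <;> simp [pvScan] at hp
  | cons line rest ih =>
    intro idx labs p hp
    cases labs with
    | nil => simp [pvScan] at hp
    | cons kl labs' =>
      obtain ⟨k, lab⟩ := kl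
      simp only [pvScan] at hp
      split_ifs at hp with h
      · rcases List.mem_cons.mp hp with h' | h'
        · subst h'; simp
        · have := ih (idx + 1) labs' p h'; omega
      · have := ih (idx + 1) ((k, lab) :: labs') p hp; omega

theorem labels_drop (ti : Nat) (h : ti < 4) :
    (PySem.List.enumerate pvLabelsB 0).drop ti =
      ((ti : Int), (PySem.List.pyGet? pvTargets ((ti : Int))).getD "") ::
        (PySem.List.enumerate pvLabelsB 0).drop (ti + 1) := by
  interval_cases ti <;> rfl

theorem labels_drop_four :
    (PySem.List.enumerate pvLabelsB 0).drop 4 = [] := by rfl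

-- main invariant: A's loop from target ti over a suffix of lines equals B's rebuild of the
-- same suffix (enumerated from idx) against the points the pre-scan finds from there
theorem pv_main (links ocrs : List String) :
    ∀ (lines : List String) (idx : Int) (ti : Nat), ti ≤ 4 →
      pvALoop links ocrs lines ti [] =
        pvRebuild links ocrs (PySem.List.enumerate lines idx)
          (pvScan lines idx ((PySem.List.enumerate pvLabelsB 0).drop ti)) := by
  intro lines
  induction lines with
  | nil =>
    intro idx ti _
    rcases h : (PySem.List.enumerate pvLabelsB 0).drop ti with _ | ⟨p, labs⟩ <;>
      simp [pvALoop, pvScan, pvRebuild, PySem.List.enumerate_nil]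
  | cons line rest ih =>
    intro idx ti hti
    rw [PySem.List.enumerate_cons]
    by_cases h4 : ti < 4
    · rw [labels_drop ti h4]
      simp only [pvALoop, pvScan]
      by_cases hm : PySem.Str.strip line = (PySem.List.pyGet? pvTargets ((ti : Int))).getD ""
      · -- the label matches: both sides append the block for option ti and advance
        rw [if_pos ⟨h4, hm⟩, if_pos hm]
        simp only [pvRebuild, if_true]
        rw [pvALoop_append, ih (idx + 1) (ti + 1) (by omega)]
        simp only [pvBlock]
        split_ifs <;> simp
      · rw [if_neg (by tauto), if_neg hm]
        rw [pvALoop_append, ih (idx + 1) ti (by omega), labels_drop ti h4]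
        rcases hscan : pvScan rest (idx + 1)
            (((ti : Int), (PySem.List.pyGet? pvTargets ((ti : Int))).getD "") ::
              (PySem.List.enumerate pvLabelsB 0).drop (ti + 1)) with _ | ⟨⟨j, k⟩, pts⟩
        · simp [pvRebuild]
        · have hj : idx + 1 ≤ j := by
            have := pvScan_lb rest (idx + 1) _ (j, k) (by rw [hscan]; simp)
            simpa using this
          simp only [pvRebuild, if_neg (by omega : ¬ j = idx)]
          simp
    · -- ti = 4: no labels left, both sides just copy the lines
      have : ti = 4 := by omega
      subst this
      rw [labels_drop_four]
      simp only [pvALoop, pvScan, pvRebuild]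
      rw [if_neg (by simp), pvALoop_append, ih (idx + 1) 4 le_rfl, labels_drop_four]
      simp [pvScan]

-- ===== VERDICT (by name: the statement is the Claim_ definition above) =====
theorem inject_option_images_spec : Claim_equal_inject_option_images := by
  intro page_text links ocrs _
  unfold Spec_inject_option_images inject_option_images inject_option_images_alt
  split_ifs with h
  · rfl
  · exact congrArg _ (pv_main links ocrs ((PySem.Str.split? page_text "\n").getD []) 0 0 (by omega))
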